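-- pv_equiv track=rewrite | github.com/Mortom123/aoc24 | day12/main.py | get_perimeter
-- ===== SOURCE A (Python) =====
-- from typing import Set, Tuple, List
--
-- def get_perimeter(region: Set[Tuple[int, int]], connections: Set[Tuple[int, int]]) -> float:
--     total = 0
--     for node in region:
--         possible = len(connections)
--         for con in connections:
--             neighbor_node = node[0] + con[0], node[1] + con[1]
--             if neighbor_node in region:
--                 possible -= 1
--         total += possible
--     return total
-- ===== SOURCE B (Python) =====
-- def get_perimeter(region, connections):
--     seen = set()
--     internal = 0
--     for v in region:
--         seen.add(v)
--         for c in connections: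
--             if (v[0] + c[0], v[1] + c[1]) in seen:
--                 internal += 1
--             w = (v[0] - c[0], v[1] - c[1])
--             if w != v and w in seen:
--                 internal += 1
--     return len(seen) * len(connections) - internal
-- ===== Notes on version B (the rewrite author's own statement) =====
-- stated objective: alternative
-- what changed: Replaces A's per-node scan testing neighbors against the whole region with a single online pass over a growing 'seen' set that charges each internal adjacency exactly once at its later endpoint (checking both +c and -c against the prefix only), then returns len(seen)*len(connections) minus that count.
import Mathlib
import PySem

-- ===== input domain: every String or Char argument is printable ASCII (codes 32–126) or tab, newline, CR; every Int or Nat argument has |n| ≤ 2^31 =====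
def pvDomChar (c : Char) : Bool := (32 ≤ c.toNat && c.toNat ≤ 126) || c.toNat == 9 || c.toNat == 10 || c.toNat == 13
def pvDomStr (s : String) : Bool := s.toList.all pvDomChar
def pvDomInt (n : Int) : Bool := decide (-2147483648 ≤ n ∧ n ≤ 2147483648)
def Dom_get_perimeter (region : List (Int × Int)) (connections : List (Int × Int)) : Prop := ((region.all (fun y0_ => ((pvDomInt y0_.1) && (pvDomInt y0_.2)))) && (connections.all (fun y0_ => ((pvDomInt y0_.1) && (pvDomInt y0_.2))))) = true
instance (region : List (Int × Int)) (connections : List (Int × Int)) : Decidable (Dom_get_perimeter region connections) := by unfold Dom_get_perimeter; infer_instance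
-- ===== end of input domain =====

-- B replaces A's global per-node membership scan by a single online pass with a growing `seen`
-- set, charging each internal adjacency once at its later endpoint (alternative; same cost).

-- ===== PORT A =====
def get_perimeter (region : List (Int × Int)) (connections : List (Int × Int)) : Int :=
  region.foldl (fun total node =>
    total +
      connections.foldl (fun possible con =>
        if (node.1 + con.1, node.2 + con.2) ∈ region then possible - 1 else possible)
        (connections.length : Int)) 0

-- ===== PORT B =====
def get_perimeter_alt (region : List (Int × Int)) (connections : List (Int × Int)) : Int :=
  let st := region.foldl (fun (st : PySem.Set (Int × Int) × Int) v =>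
    let seen := PySem.Set.add st.1 v
    let internal := connections.foldl (fun acc c =>
      let acc' := if (v.1 + c.1, v.2 + c.2) ∈ seen then acc + 1 else acc
      let w := (v.1 - c.1, v.2 - c.2)
      if w ≠ v ∧ w ∈ seen then acc' + 1 else acc') st.2
    (seen, internal)) (PySem.Set.empty, 0)
  (PySem.Set.len st.1) * (connections.length : Int) - st.2

-- ===== PRECONDITION & SPEC =====
-- Pre_ excludes region lists containing duplicate elements: region is a Python set, which a duplicate-carrying list does not represent.
def Pre_get_perimeter (region : List (Int × Int)) (connections : List (Int × Int)) : Prop :=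
  region.Nodup
instance (region : List (Int × Int)) (connections : List (Int × Int)) : Decidable (Pre_get_perimeter region connections) := by unfold Pre_get_perimeter; infer_instance
def pvWitness_get_perimeter : (List (Int × Int)) × (List (Int × Int)) :=
  ([(0, 0), (1, 0)], [(1, 0), (-1, 0), (0, 1), (0, -1)])

def Spec_get_perimeter (region : List (Int × Int)) (connections : List (Int × Int)) (out : Int) : Prop := out = get_perimeter_alt region connections
instance (region : List (Int × Int)) (connections : List (Int × Int)) (out : Int) : Decidable (Spec_get_perimeter region connections out) := by unfold Spec_get_perimeter; infer_instance

-- ===== CLAIM (what is proved, stated in full; the proofs are below) =====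
def Claim_equal_get_perimeter : Prop := ∀ (region : List (Int × Int)) (connections : List (Int × Int)), Dom_get_perimeter region connections → Pre_get_perimeter region connections → Spec_get_perimeter region connections (get_perimeter region connections)

-- ===== LEMMAS AND PROOFS =====

-- A's inner loop: start at |connections| and decrement per inside-neighbor.
theorem pv_inner_A (region : List (Int × Int)) (node : Int × Int)
    (conns : List (Int × Int)) (init : Int) :
    conns.foldl (fun possible con =>
        if (node.1 + con.1, node.2 + con.2) ∈ region then possible - 1 else possible) init
      = init - (conns.countP (fun con => decide ((node.1 + con.1, node.2 + con.2) ∈ region)) : Int) := by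
  induction conns generalizing init with
  | nil => simp
  | cons c cs ih =>
    simp only [List.foldl_cons, List.countP_cons, ih]
    by_cases h : (node.1 + c.1, node.2 + c.2) ∈ region <;>
      simp only [h, decide_true, decide_false, if_true, if_false] <;> push_cast <;> ring

-- B's inner loop adds the two counts to its accumulator.
theorem pv_inner_B (seen : List (Int × Int)) (v : Int × Int)
    (conns : List (Int × Int)) (init : Int) :
    conns.foldl (fun acc c =>
        let acc' := if (v.1 + c.1, v.2 + c.2) ∈ seen then acc + 1 else acc
        let w := (v.1 - c.1, v.2 - c.2)
        if w ≠ v ∧ w ∈ seen then acc' + 1 else acc') init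
      = init + (conns.countP (fun c => decide ((v.1 + c.1, v.2 + c.2) ∈ seen)) : Int)
             + (conns.countP (fun c => decide ((v.1 - c.1, v.2 - c.2) ≠ v ∧ (v.1 - c.1, v.2 - c.2) ∈ seen)) : Int) := by
  induction conns generalizing init with
  | nil => simp
  | cons c cs ih =>
    rw [List.foldl_cons]
    simp only [List.countP_cons, ih]
    by_cases h1 : (v.1 + c.1, v.2 + c.2) ∈ seen <;>
    by_cases h2 : (v.1 - c.1, v.2 - c.2) ≠ v ∧ (v.1 - c.1, v.2 - c.2) ∈ seen <;>
      simp [h1, h2] <;> push_cast <;> omega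

-- counting a disjunction of incompatible predicates
theorem pv_countP_or {α : Type} (L : List α) (p q : α → Prop)
    [DecidablePred p] [DecidablePred q] (h : ∀ x, ¬ (p x ∧ q x)) :
    (L.countP (fun x => decide (p x ∨ q x)))
      = L.countP (fun x => decide (p x)) + L.countP (fun x => decide (q x)) := by
  induction L with
  | nil => simp
  | cons a L ih =>
    simp only [List.countP_cons, ih]
    by_cases hp : p a <;> by_cases hq : q a
    · exact absurd ⟨hp, hq⟩ (h a)
    all_goals simp [hp, hq] <;> omega

-- double-counting exchange
theorem pv_sum_comm (l1 l2 : List (Int × Int)) (f : (Int × Int) → (Int × Int) → Bool) :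
    ((l1.map (fun a => (l2.countP (f a) : Int))).sum)
      = ((l2.map (fun b => (l1.countP (fun a => f a b) : Int))).sum) := by
  induction l1 with
  | nil => simp
  | cons a l1 ih =>
    simp only [List.map_cons, List.sum_cons, ih, List.countP_cons]
    push_cast
    rw [PySem.List.sum_map_add_int, ← PySem.List.sum_map_ite_one_zero (p := f a)]
    omega

-- count of "equals a" in a nodup list is a membership indicator
theorem pv_count_eq (l : List (Int × Int)) (hnd : l.Nodup) (a : Int × Int) :
    l.countP (fun v => decide (v = a)) = if a ∈ l then 1 else 0 := by
  induction l with
  | nil => simp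
  | cons b l ih =>
    simp only [List.countP_cons, List.nodup_cons] at *
    rcases hnd with ⟨hb, hl⟩
    by_cases h : b = a
    · subst h
      rw [ih hl]
      simp [hb]
    · rw [ih hl]
      by_cases hal : a ∈ l <;> simp [hal, h, Ne.symm h, List.mem_cons]

-- sum of (c - f a) over a list
theorem pv_sum_const_sub (l : List (Int × Int)) (c : Int) (f : (Int × Int) → Int) :
    (l.map (fun a => c - f a)).sum = (l.length : Int) * c - (l.map f).sum := by
  induction l with
  | nil => simp
  | cons a l ih =>
    simp only [List.map_cons, List.sum_cons, List.length_cons, ih]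
    push_cast; ring

-- B's fold state after a nodup prefix: seen = the prefix, internal = full within-prefix adjacency count.
theorem pv_B_state (conns : List (Int × Int)) (l : List (Int × Int)) (hnd : l.Nodup) :
    l.foldl (fun (st : PySem.Set (Int × Int) × Int) v =>
      let seen := PySem.Set.add st.1 v
      let internal := conns.foldl (fun acc c =>
        let acc' := if (v.1 + c.1, v.2 + c.2) ∈ seen then acc + 1 else acc
        let w := (v.1 - c.1, v.2 - c.2)
        if w ≠ v ∧ w ∈ seen then acc' + 1 else acc') st.2
      (seen, internal)) (PySem.Set.empty, 0)
    = (l, (l.map (fun v => (conns.countP (fun c => decide ((v.1 + c.1, v.2 + c.2) ∈ l)) : Int))).sum) := by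
  induction l using List.reverseRecOn with
  | nil => rfl
  | append_singleton l u ih =>
    have hl : l.Nodup := (List.nodup_append.mp hnd).1
    have hu : u ∉ l := by
      intro h
      exact (List.nodup_append.mp hnd).2.2 u h u (List.mem_singleton_self u) rfl
    rw [List.foldl_append, ih hl]
    simp only [List.foldl_cons, List.foldl_nil]
    have hadd : PySem.Set.add l u = l ++ [u] := PySem.Set.add_of_not_mem hu
    rw [hadd, pv_inner_B]
    refine Prod.ext rfl ?_
    simp only
    have h2 : (conns.countP (fun c => decide ((u.1 - c.1, u.2 - c.2) ≠ u ∧ (u.1 - c.1, u.2 - c.2) ∈ l ++ [u])))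
        = conns.countP (fun c => decide ((u.1 - c.1, u.2 - c.2) ∈ l)) := by
      apply List.countP_congr
      intro c _
      simp only [decide_eq_true_eq, List.mem_append, List.mem_singleton]
      constructor
      · rintro ⟨hne, hm | he⟩
        · exact hm
        · exact absurd he hne
      · intro hm
        exact ⟨fun he => hu (he ▸ hm), Or.inl hm⟩
    have hsplit : ∀ v : Int × Int,
        (conns.countP (fun c => decide ((v.1 + c.1, v.2 + c.2) ∈ l ++ [u])))
          = conns.countP (fun c => decide ((v.1 + c.1, v.2 + c.2) ∈ l))
            + conns.countP (fun c => decide ((v.1 + c.1, v.2 + c.2) = u)) := by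
      intro v
      have hor := pv_countP_or conns (fun c => (v.1 + c.1, v.2 + c.2) ∈ l)
        (fun c => (v.1 + c.1, v.2 + c.2) = u) (fun c hc => hu (hc.2 ▸ hc.1))
      rw [← hor]
      apply List.countP_congr
      intro c _
      simp only [decide_eq_true_eq]
      simp [List.mem_append]
    have hswap : (l.map (fun v => (conns.countP (fun c => decide ((v.1 + c.1, v.2 + c.2) = u)) : Int))).sum
        = (conns.countP (fun c => decide ((u.1 - c.1, u.2 - c.2) ∈ l)) : Int) := by
      rw [pv_sum_comm l conns (fun v c => decide ((v.1 + c.1, v.2 + c.2) = u))]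
      have hcnt : ∀ c : Int × Int, l.countP (fun v => decide ((v.1 + c.1, v.2 + c.2) = u))
          = if (u.1 - c.1, u.2 - c.2) ∈ l then 1 else 0 := by
        intro c
        rw [← pv_count_eq l hl (u.1 - c.1, u.2 - c.2)]
        apply List.countP_congr
        intro v _
        simp only [decide_eq_true_eq, Prod.ext_iff]
        omega
      have hmapc : conns.map (fun c => (l.countP (fun v => decide ((v.1 + c.1, v.2 + c.2) = u)) : Int))
          = conns.map (fun c => if decide ((u.1 - c.1, u.2 - c.2) ∈ l) then (1 : Int) else 0) := by
        apply List.map_congr_left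
        intro c _
        rw [hcnt c]
        by_cases h : (u.1 - c.1, u.2 - c.2) ∈ l <;> simp [h]
      rw [hmapc, PySem.List.sum_map_ite_one_zero]
    have hmap : l.map (fun v => (conns.countP (fun c => decide ((v.1 + c.1, v.2 + c.2) ∈ l ++ [u])) : Int))
        = l.map (fun v => (conns.countP (fun c => decide ((v.1 + c.1, v.2 + c.2) ∈ l)) : Int)
            + (conns.countP (fun c => decide ((v.1 + c.1, v.2 + c.2) = u)) : Int)) := by
      apply List.map_congr_left
      intro v _
      rw [hsplit v]
      push_cast
      ring
    rw [List.map_append, List.sum_append, hmap, PySem.List.sum_map_add_int, hswap]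
    simp only [List.map_cons, List.map_nil, List.sum_cons, List.sum_nil, h2,
      hsplit u]
    push_cast
    ring

-- ===== VERDICT (by name: the statement is the Claim_ definition above) =====
theorem get_perimeter_spec : Claim_equal_get_perimeter := by
  intro region connections _ hpre
  unfold Spec_get_perimeter get_perimeter get_perimeter_alt
  have hA : region.foldl (fun total node =>
      total + connections.foldl (fun possible con =>
        if (node.1 + con.1, node.2 + con.2) ∈ region then possible - 1 else possible)
        (connections.length : Int)) 0
    = (region.map (fun node => (connections.length : Int)
        - (connections.countP (fun con => decide ((node.1 + con.1, node.2 + con.2) ∈ region)) : Int))).sum := by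
    rw [PySem.List.foldl_congr_mem (g := fun total node =>
      total + ((connections.length : Int)
        - (connections.countP (fun con => decide ((node.1 + con.1, node.2 + con.2) ∈ region)) : Int)))]
    · rw [PySem.List.foldl_add]; simp
    · intro acc x _; rw [pv_inner_A]
  rw [hA, pv_B_state connections region hpre]
  simp only
  rw [pv_sum_const_sub]
  have hlen : PySem.Set.len region = (region.length : Int) := rfl
  rw [hlen]
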